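-- pv_equiv track=rewrite | github.com/HJJoosse/Adventofcode | aoc2024/src/days/day2.py | count_safe_codes
-- ===== SOURCE A (Python) =====
-- def compare_sorted(code:list):
--     return (sorted(code) == code) or (sorted(code,reverse=True) == code)
--
-- def is_safe(code:list):
--     sums = [abs(code[x]-code[x+1]) for x in range(len(code)-1)]
--     return (max(sums) <= 3) & (min(sums) > 0)
--
-- def count_safe_codes(int_data:list,damper = False) -> int:
--     safe_code_count = 0
--     for code in int_data:
--         if compare_sorted(code) & is_safe(code):
--             safe_code_count += 1
--         else:
--             if damper:
--                 for i in range(len(code)):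
--                     code_new = code.copy()
--                     code_new.pop(i)
--                     if compare_sorted(code_new) & is_safe(code_new):
--                         safe_code_count += 1
--                         break
--             continue
--     return safe_code_count
-- ===== SOURCE B (Python) =====
-- def _viol_index(code, lo, hi):
--     """Index of first adjacent pair whose step b-a lies outside [lo, hi], else None."""
--     for i, (a, b) in enumerate(zip(code, code[1:])):
--         if not (lo <= b - a <= hi):
--             return i
--     return None
--
--
-- def _dir_safe(code, lo, hi, damper):
--     """Safe in one direction, optionally allowing one removal.
--
--     If the first violating pair is at index v, only removing element v or v+1
--     can help (any other removal leaves that pair adjacent)."""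
--     v = _viol_index(code, lo, hi)
--     if v is None:
--         return True
--     if not damper:
--         return False
--     return (_viol_index(code[:v] + code[v + 1:], lo, hi) is None
--             or _viol_index(code[:v + 1] + code[v + 2:], lo, hi) is None)
--
--
-- def count_safe_codes(int_data: list, damper=False) -> int:
--     return sum(1 for code in int_data
--                if _dir_safe(code, 1, 3, damper) or _dir_safe(code, -3, -1, damper))
-- ===== Notes on version B (the rewrite author's own statement) =====
-- stated objective: faster
-- what changed: B replaces A's sort-and-compare safety test plus brute-force try-every-removal damper loop with a single pairwise scan per direction that, on the first violating pair at index v, tests only the two removals v and v+1 (no other removal can help).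
import Mathlib
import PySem

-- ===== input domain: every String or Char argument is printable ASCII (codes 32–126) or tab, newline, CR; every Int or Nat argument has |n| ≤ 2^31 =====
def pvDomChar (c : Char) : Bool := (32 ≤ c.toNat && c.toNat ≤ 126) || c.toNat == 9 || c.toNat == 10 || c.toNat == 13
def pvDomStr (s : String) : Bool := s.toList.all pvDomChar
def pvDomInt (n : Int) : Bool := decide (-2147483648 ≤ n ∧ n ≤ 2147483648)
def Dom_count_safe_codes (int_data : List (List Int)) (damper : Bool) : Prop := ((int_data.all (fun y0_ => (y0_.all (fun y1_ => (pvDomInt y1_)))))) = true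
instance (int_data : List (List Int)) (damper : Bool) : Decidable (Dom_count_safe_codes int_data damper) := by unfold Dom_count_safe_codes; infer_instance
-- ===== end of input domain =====

-- B replaces A's sort-and-compare safety test and brute-force try-every-removal loop with one
-- pairwise scan per direction that only retries the two removals at the first violating pair.

-- ===== PORT A =====
def compare_sorted (code : List Int) : Bool :=
  (PySem.List.sorted code (fun x => x) false == code) ||
  (PySem.List.sorted code (fun x => x) true == code)

-- max()/min() of an empty sequence raise ValueError in Python; Pre_ keeps the codes reaching
-- that out, so the indices below are always in range (pyGetD's default is never read).
def is_safe (code : List Int) : Bool :=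
  let sums : List Int := (PySem.List.pyRange 0 (PySem.List.len code - 1) 1).map
    (fun x => |PySem.List.pyGetD code x 0 - PySem.List.pyGetD code (x + 1) 0|)
  match PySem.List.max? sums (fun y => y), PySem.List.min? sums (fun y => y) with
  | some mx, some mn => decide (mx ≤ 3) && decide (mn > 0)
  | _, _ => false

def count_safe_codes (int_data : List (List Int)) (damper : Bool) : Int :=
  int_data.foldl (fun safe_code_count code =>
    if compare_sorted code && is_safe code then safe_code_count + 1
    else if damper then
      if (PySem.List.pyRange 0 (PySem.List.len code) 1).any (fun i =>
            match PySem.List.pop? code i with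
            | some r => compare_sorted r.2 && is_safe r.2
            | none => false)
      then safe_code_count + 1 else safe_code_count
    else safe_code_count) 0

-- ===== PORT B =====
-- index of the first adjacent pair whose step b - a lies outside [lo, hi], else none
def viol_index (code : List Int) (lo hi : Int) : Option Nat :=
  match code with
  | a :: b :: rest =>
      if lo ≤ b - a ∧ b - a ≤ hi then (viol_index (b :: rest) lo hi).map (· + 1)
      else some 0
  | _ => none

def dir_safe (code : List Int) (lo hi : Int) (damper : Bool) : Bool :=
  match viol_index code lo hi with
  | none => true
  | some v => damper &&
      ((viol_index (code.eraseIdx v) lo hi).isNone ||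
       (viol_index (code.eraseIdx (v + 1)) lo hi).isNone)

def count_safe_codes_alt (int_data : List (List Int)) (damper : Bool) : Int :=
  int_data.foldl (fun acc code =>
    acc + (if dir_safe code 1 3 damper || dir_safe code (-3) (-1) damper then 1 else 0)) 0

-- ===== PRECONDITION & SPEC =====
-- Pre_ excludes exactly the inputs where A raises ValueError (max()/min() of an empty sequence):
-- some code shorter than 2 elements, or, with the damper on, an unsafe 2-element code whose
-- inner loop pops down to a single element.
def Pre_count_safe_codes (int_data : List (List Int)) (damper : Bool) : Prop :=
  ∀ code ∈ int_data, 2 ≤ code.length ∧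
    (damper = true → 3 ≤ code.length ∨
      (1 ≤ |code.getD 1 0 - code.getD 0 0| ∧ |code.getD 1 0 - code.getD 0 0| ≤ 3))
instance (int_data : List (List Int)) (damper : Bool) : Decidable (Pre_count_safe_codes int_data damper) := by
  unfold Pre_count_safe_codes; infer_instance

def pvWitness_count_safe_codes : List (List Int) × Bool := ([[1, 2, 4], [5, 1, 2], [3, 6]], true)

def Spec_count_safe_codes (int_data : List (List Int)) (damper : Bool) (out : Int) : Prop :=
  out = count_safe_codes_alt int_data damper
instance (int_data : List (List Int)) (damper : Bool) (out : Int) : Decidable (Spec_count_safe_codes int_data damper out) := by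
  unfold Spec_count_safe_codes; infer_instance

-- ===== CLAIM (what is proved, stated in full; the proofs are below) =====
def Claim_equal_count_safe_codes : Prop := ∀ (int_data : List (List Int)) (damper : Bool), Dom_count_safe_codes int_data damper → Pre_count_safe_codes int_data damper → Spec_count_safe_codes int_data damper (count_safe_codes int_data damper)

-- ===== LEMMAS AND PROOFS =====

-- adjacent-step predicate in index form
def OkI (lo hi : Int) (l : List Int) : Prop :=
  ∀ i, (h : i + 1 < l.length) → lo ≤ l[i + 1] - l[i] ∧ l[i + 1] - l[i] ≤ hi

theorem okI_cons_cons {lo hi a b : Int} {rest : List Int} :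
    OkI lo hi (a :: b :: rest) ↔ (lo ≤ b - a ∧ b - a ≤ hi) ∧ OkI lo hi (b :: rest) := by
  constructor
  · intro h
    refine ⟨h 0 (by simp), fun i hi' => ?_⟩
    have := h (i + 1) (by simpa using Nat.succ_lt_succ hi')
    simpa using this
  · rintro ⟨h0, h⟩ i hi'
    match i with
    | 0 => simpa using h0
    | j + 1 =>
      have := h j (by simpa using Nat.lt_of_succ_lt_succ hi')
      simpa using this

theorem okI_short {lo hi : Int} {l : List Int} (h : l.length ≤ 1) : OkI lo hi l := by
  intro i hi'; omega

theorem viol_none_iff (l : List Int) (lo hi : Int) :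
    viol_index l lo hi = none ↔ OkI lo hi l := by
  induction l with
  | nil => simpa [viol_index] using okI_short (by simp)
  | cons a tail ih =>
    cases tail with
    | nil => simpa [viol_index] using okI_short (by simp)
    | cons b rest =>
      rw [okI_cons_cons]
      by_cases hc : lo ≤ b - a ∧ b - a ≤ hi
      · simp only [viol_index, if_pos hc, Option.map_eq_none_iff, ih]
        simp [hc]
      · rw [viol_index, if_neg hc]
        exact iff_of_false (by simp) (fun h => hc h.1)

theorem viol_some_lt {l : List Int} {lo hi : Int} {v : Nat}
    (h : viol_index l lo hi = some v) : v + 1 < l.length := by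
  induction l generalizing v with
  | nil => simp [viol_index] at h
  | cons a tail ih =>
    cases tail with
    | nil => simp [viol_index] at h
    | cons b rest =>
      by_cases hc : lo ≤ b - a ∧ b - a ≤ hi
      · simp only [viol_index, if_pos hc, Option.map_eq_some_iff] at h
        obtain ⟨v', hv', rfl⟩ := h
        have := ih hv'
        simpa using Nat.succ_lt_succ this
      · simp only [viol_index, if_neg hc, Option.some.injEq] at h
        subst h; simp

theorem viol_none_tail {lo hi a : Int} {t : List Int}
    (h : viol_index (a :: t) lo hi = none) : viol_index t lo hi = none := by
  cases t with
  | nil => simp [viol_index]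
  | cons b rest =>
    by_cases hc : lo ≤ b - a ∧ b - a ≤ hi
    · rw [viol_index, if_pos hc] at h
      simpa using h
    · rw [viol_index, if_neg hc] at h
      simp at h

-- only removing one end of the FIRST violating pair can repair a report
theorem viol_erase_key {l : List Int} {lo hi : Int} {v : Nat}
    (hs : viol_index l lo hi = some v) :
    ∀ j, viol_index (l.eraseIdx j) lo hi = none → j = v ∨ j = v + 1 := by
  induction l generalizing v with
  | nil => simp [viol_index] at hs
  | cons a tail ih =>
    cases tail with
    | nil => simp [viol_index] at hs
    | cons b rest =>
      intro j hj
      by_cases hc : lo ≤ b - a ∧ b - a ≤ hi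
      · simp only [viol_index, if_pos hc, Option.map_eq_some_iff] at hs
        obtain ⟨v', hv', rfl⟩ := hs
        match j with
        | 0 =>
          rw [List.eraseIdx_cons_zero] at hj
          rw [hv'] at hj; simp at hj
        | j' + 1 =>
          rw [List.eraseIdx_cons_succ] at hj
          have htail := viol_none_tail hj
          rcases ih hv' j' htail with h | h <;> omega
      · simp only [viol_index, if_neg hc, Option.some.injEq] at hs
        subst hs
        match j with
        | 0 => left; rfl
        | 1 => right; rfl
        | j'' + 2 =>
          exfalso
          rw [List.eraseIdx_cons_succ, List.eraseIdx_cons_succ] at hj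
          rw [viol_index, if_neg hc] at hj
          simp at hj

theorem sorted_asc_iff (l : List Int) :
    PySem.List.sorted l (fun x => x) false = l ↔
    ∀ i, (h : i + 1 < l.length) → l[i] ≤ l[i + 1] := by
  constructor
  · intro h
    have hp : List.Pairwise (fun a b : Int => a ≤ b) l := by
      have h0 := PySem.List.sorted_pairwise l (fun x => x)
      rw [h] at h0
      exact h0
    exact List.isChain_iff_getElem.mp (List.isChain_iff_pairwise.mpr hp)
  · intro h
    have hc : List.Pairwise (fun a b : Int => a ≤ b) l :=
      List.isChain_iff_pairwise.mp (List.isChain_iff_getElem.mpr h)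
    exact PySem.List.sorted_eq_self_of_pairwise l (fun x => x) hc

theorem sorted_desc_iff (l : List Int) :
    PySem.List.sorted l (fun x => x) true = l ↔
    ∀ i, (h : i + 1 < l.length) → l[i + 1] ≤ l[i] := by
  haveI : Trans (fun a b : Int => b ≤ a) (fun a b : Int => b ≤ a) (fun a b : Int => b ≤ a) :=
    ⟨fun h1 h2 => le_trans h2 h1⟩
  constructor
  · intro h
    have hp : List.Pairwise (fun a b : Int => b ≤ a) l := by
      have h0 := PySem.List.sorted_pairwise_rev l (fun x => x)
      rw [h] at h0
      exact h0
    exact List.isChain_iff_getElem.mp (List.isChain_iff_pairwise.mpr hp)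
  · intro h
    have hc : List.Pairwise (fun a b : Int => b ≤ a) l :=
      List.isChain_iff_pairwise.mp (List.isChain_iff_getElem.mpr h)
    exact PySem.List.sorted_rev_eq_self_of_pairwise l (fun x => x) hc

theorem compare_sorted_iff (l : List Int) :
    compare_sorted l = true ↔
      (∀ i, (h : i + 1 < l.length) → l[i] ≤ l[i + 1]) ∨
      (∀ i, (h : i + 1 < l.length) → l[i + 1] ≤ l[i]) := by
  simp only [compare_sorted, Bool.or_eq_true, beq_iff_eq]
  rw [sorted_asc_iff, sorted_desc_iff]

theorem maxmin_check (S : List Int) (hne : S ≠ []) :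
    (match PySem.List.max? S (fun y => y), PySem.List.min? S (fun y => y) with
     | some mx, some mn => decide (mx ≤ 3) && decide (mn > 0)
     | _, _ => false) = true ↔ ∀ y ∈ S, 1 ≤ y ∧ y ≤ 3 := by
  rcases hmx : PySem.List.max? S (fun y => y) with _ | mx
  · exact absurd ((PySem.List.max?_eq_none_iff S _).mp hmx) hne
  rcases hmn : PySem.List.min? S (fun y => y) with _ | mn
  · exact absurd ((PySem.List.min?_eq_none_iff S _).mp hmn) hne
  simp only [Bool.and_eq_true, decide_eq_true_eq]
  constructor
  · rintro ⟨h3, h0⟩ y hy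
    have h1 := PySem.List.max?_isMax hmx y hy
    have h2 := PySem.List.min?_isMin hmn y hy
    simp only at h1 h2
    omega
  · intro h
    have h1 := h mx (PySem.List.max?_mem hmx)
    have h2 := h mn (PySem.List.min?_mem hmn)
    omega

theorem is_safe_iff (l : List Int) (h2 : 2 ≤ l.length) :
    is_safe l = true ↔
      ∀ i, (h : i + 1 < l.length) → 1 ≤ |l[i] - l[i + 1]| ∧ |l[i] - l[i + 1]| ≤ 3 := by
  have hr : PySem.List.pyRange 0 ((l.length : Int) - 1) 1 =
      (List.range (l.length - 1)).map (fun k : Nat => (k : Int)) := by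
    rw [PySem.List.pyRange_one]
    have : (((l.length : Int) - 1) - 0).toNat = l.length - 1 := by omega
    rw [this]
    exact List.map_congr_left fun k _ => by simp
  have hS : ((PySem.List.pyRange 0 (PySem.List.len l - 1) 1).map
      (fun x => |PySem.List.pyGetD l x 0 - PySem.List.pyGetD l (x + 1) 0|)) =
      (List.range (l.length - 1)).map (fun k => |l.getD k 0 - l.getD (k + 1) 0|) := by
    rw [PySem.List.len_eq, hr, List.map_map]
    refine List.map_congr_left (fun k hk => ?_)
    have h1 : PySem.List.pyGetD l (k : Int) 0 = l.getD k 0 := PySem.List.pyGetD_natCast ..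
    have h2 : PySem.List.pyGetD l ((k : Int) + 1) 0 = l.getD (k + 1) 0 := by
      have : ((k : Int) + 1) = ((k + 1 : Nat) : Int) := by push_cast; ring
      rw [this, PySem.List.pyGetD_natCast]
    simp [Function.comp, h1, h2]
  rw [is_safe]
  simp only [hS]
  rw [maxmin_check _ (by simp; omega)]
  rw [List.forall_mem_map]
  simp only [List.mem_range]
  constructor
  · intro h i hi'
    have := h i (by omega)
    rwa [List.getD_eq_getElem l 0 (by omega), List.getD_eq_getElem l 0 (by omega)] at this
  · intro h k hk
    have := h k (by omega)
    rwa [List.getD_eq_getElem l 0 (by omega), List.getD_eq_getElem l 0 (by omega)]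

-- A's per-code safety test agrees with B's two directional scans
theorem sa_char (l : List Int) (h2 : 2 ≤ l.length) :
    (compare_sorted l && is_safe l) = true ↔
      (viol_index l 1 3 = none ∨ viol_index l (-3) (-1) = none) := by
  rw [Bool.and_eq_true, compare_sorted_iff, is_safe_iff l h2, viol_none_iff, viol_none_iff]
  constructor
  · rintro ⟨hA | hB, hC⟩
    · left; intro i hi'
      have h1 := hA i hi'
      have hc := hC i hi'
      rcases abs_cases (l[i] - l[i + 1]) with ⟨he, hs⟩ | ⟨he, hs⟩ <;> omega
    · right; intro i hi'
      have h1 := hB i hi'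
      have hc := hC i hi'
      rcases abs_cases (l[i] - l[i + 1]) with ⟨he, hs⟩ | ⟨he, hs⟩ <;> omega
  · rintro (h | h)
    · refine ⟨Or.inl fun i hi' => ?_, fun i hi' => ?_⟩ <;>
      · have := h i hi'
        rcases abs_cases (l[i] - l[i + 1]) with ⟨he, hs⟩ | ⟨he, hs⟩ <;> omega
    · refine ⟨Or.inr fun i hi' => ?_, fun i hi' => ?_⟩ <;>
      · have := h i hi'
        rcases abs_cases (l[i] - l[i + 1]) with ⟨he, hs⟩ | ⟨he, hs⟩ <;> omega

-- per-code contribution: A's step equals B's step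
theorem step_eq (damper : Bool) (code : List Int) (acc : Int) (h2 : 2 ≤ code.length)
    (hd : damper = true → 3 ≤ code.length ∨
      (1 ≤ |code.getD 1 0 - code.getD 0 0| ∧ |code.getD 1 0 - code.getD 0 0| ≤ 3)) :
    (if compare_sorted code && is_safe code then acc + 1
     else if damper then
      if (PySem.List.pyRange 0 (PySem.List.len code) 1).any (fun i =>
            match PySem.List.pop? code i with
            | some r => compare_sorted r.2 && is_safe r.2
            | none => false)
      then acc + 1 else acc
     else acc) =
    acc + (if dir_safe code 1 3 damper || dir_safe code (-3) (-1) damper then 1 else 0) := by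
  by_cases hsa : (compare_sorted code && is_safe code) = true
  · rw [if_pos hsa]
    rcases (sa_char code h2).mp hsa with h | h
    · have hb : dir_safe code 1 3 damper = true := by rw [dir_safe, h]
      rw [if_pos (by simp [hb])]
    · have hb : dir_safe code (-3) (-1) damper = true := by rw [dir_safe, h]
      rw [if_pos (by simp [hb])]
  · rw [if_neg hsa]
    have hboth : ¬ (viol_index code 1 3 = none ∨ viol_index code (-3) (-1) = none) :=
      fun hv => hsa ((sa_char code h2).mpr hv)
    rcases h13 : viol_index code 1 3 with _ | va
    · exact absurd (Or.inl h13) hboth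
    rcases hdn : viol_index code (-3) (-1) with _ | vd
    · exact absurd (Or.inr hdn) hboth
    cases damper with
    | false =>
      have b1 : dir_safe code 1 3 false = false := by rw [dir_safe, h13]; simp
      have b2 : dir_safe code (-3) (-1) false = false := by rw [dir_safe, hdn]; simp
      rw [b1, b2]; simp
    | true =>
      have h3 : 3 ≤ code.length := by
        by_contra hlt
        rcases hd rfl with h3 | hpair
        · omega
        · apply hsa
          apply (sa_char code h2).mpr
          have hl2 : code.length = 2 := by omega
          rw [List.getD_eq_getElem code 0 (by omega), List.getD_eq_getElem code 0 (by omega)] at hpair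
          rw [viol_none_iff, viol_none_iff]
          rcases abs_cases (code[1] - code[0]) with ⟨he, hs⟩ | ⟨he, hs⟩
          · left; intro i hi'
            have hi0 : i = 0 := by omega
            subst hi0; simp only [Nat.reduceAdd]; omega
          · right; intro i hi'
            have hi0 : i = 0 := by omega
            subst hi0; simp only [Nat.reduceAdd]; omega
      have hva := viol_some_lt h13
      have hvd := viol_some_lt hdn
      -- A's inner loop as an existential
      have hany : ((PySem.List.pyRange 0 (PySem.List.len code) 1).any (fun i =>
            match PySem.List.pop? code i with
            | some r => compare_sorted r.2 && is_safe r.2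
            | none => false) = true) ↔
          ∃ k, k < code.length ∧
            (compare_sorted (code.eraseIdx k) && is_safe (code.eraseIdx k)) = true := by
        rw [PySem.List.len_eq, PySem.List.pyRange_zero_natCast, List.any_map, List.any_eq_true]
        constructor
        · rintro ⟨k, hk, hp⟩
          rw [List.mem_range] at hk
          rw [Function.comp, PySem.List.pop?_natCast code k hk] at hp
          exact ⟨k, hk, hp⟩
        · rintro ⟨k, hk, hp⟩
          refine ⟨k, List.mem_range.mpr hk, ?_⟩
          rw [Function.comp, PySem.List.pop?_natCast code k hk]
          exact hp
      have herase_len : ∀ k, k < code.length → 2 ≤ (code.eraseIdx k).length := by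
        intro k hk
        rw [List.length_eraseIdx_of_lt hk]; omega
      -- the existential agrees with B's two directional retries
      have hiff : (∃ k, k < code.length ∧
            (compare_sorted (code.eraseIdx k) && is_safe (code.eraseIdx k)) = true) ↔
          (dir_safe code 1 3 true || dir_safe code (-3) (-1) true) = true := by
        rw [dir_safe, h13, dir_safe, hdn]
        simp only [Bool.true_and, Bool.or_eq_true, Option.isNone_iff_eq_none]
        constructor
        · rintro ⟨k, hk, hsak⟩
          rcases (sa_char _ (herase_len k hk)).mp hsak with h | h
          · rcases viol_erase_key h13 k h with rfl | rfl
            · exact Or.inl (Or.inl h)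
            · exact Or.inl (Or.inr h)
          · rcases viol_erase_key hdn k h with rfl | rfl
            · exact Or.inr (Or.inl h)
            · exact Or.inr (Or.inr h)
        · rintro ((h | h) | (h | h))
          · exact ⟨va, by omega, (sa_char _ (herase_len va (by omega))).mpr (Or.inl h)⟩
          · exact ⟨va + 1, by omega, (sa_char _ (herase_len (va + 1) (by omega))).mpr (Or.inl h)⟩
          · exact ⟨vd, by omega, (sa_char _ (herase_len vd (by omega))).mpr (Or.inr h)⟩
          · exact ⟨vd + 1, by omega, (sa_char _ (herase_len (vd + 1) (by omega))).mpr (Or.inr h)⟩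
      by_cases he : (dir_safe code 1 3 true || dir_safe code (-3) (-1) true) = true
      · rw [if_pos he, if_pos (hany.mpr (hiff.mpr he))]
        simp
      · rw [if_neg (fun ha => he (hiff.mp (hany.mp ha))), if_neg he]
        simp

theorem fold_eq (damper : Bool) (l : List (List Int)) (acc : Int)
    (hp : ∀ code ∈ l, 2 ≤ code.length ∧
      (damper = true → 3 ≤ code.length ∨
        (1 ≤ |code.getD 1 0 - code.getD 0 0| ∧ |code.getD 1 0 - code.getD 0 0| ≤ 3))) :
    l.foldl (fun (safe_code_count : Int) code =>
      if compare_sorted code && is_safe code then safe_code_count + 1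
      else if damper then
        if (PySem.List.pyRange 0 (PySem.List.len code) 1).any (fun i =>
              match PySem.List.pop? code i with
              | some r => compare_sorted r.2 && is_safe r.2
              | none => false)
        then safe_code_count + 1 else safe_code_count
      else safe_code_count) acc =
    l.foldl (fun (acc : Int) code =>
      acc + (if dir_safe code 1 3 damper || dir_safe code (-3) (-1) damper then 1 else 0)) acc := by
  induction l generalizing acc with
  | nil => rfl
  | cons code rest ih =>
    rw [List.foldl_cons, List.foldl_cons]
    obtain ⟨h2, hd⟩ := hp code List.mem_cons_self
    rw [step_eq damper code acc h2 hd]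
    exact ih _ (fun c hc => hp c (List.mem_cons_of_mem _ hc))

-- ===== VERDICT (by name: the statement is the Claim_ definition above) =====
theorem count_safe_codes_spec : Claim_equal_count_safe_codes := by
  intro int_data damper _ hpre
  unfold Spec_count_safe_codes count_safe_codes count_safe_codes_alt
  exact fold_eq damper int_data 0 hpre
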